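-- pv_equiv track=rewrite | github.com/alex-yung-github/AI | 1.8othellopt2/othello_imports.py | isCapable
-- ===== SOURCE A (Python) =====
-- def isCapable(board, tokenindex, oppindex, token):
--     qboard = makeQuestionBoard(board)
--     qtokenindex = tokenindex + 9 + (2 * (int(tokenindex/8)+1))
--     qoppindex = oppindex + 9 + (2 * (int(oppindex/8)+1))
--     place = qoppindex-qtokenindex
--     i = qtokenindex + place
--     # opptoken = "x" if (token == "o") else "o"
--     see = qboard[i:i+1]
--     while(qboard[i:i+1] != "?" and qboard[i:i+1] != "."):
--         if(qboard[i:i+1] == token):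
--             return True
--         i += place
--     return False
--
-- def makeQuestionBoard(board):
--     newboard = "???????????" + board + "???????????"
--     count = 1
--     added = 0
--
--     for i in range(10, len(newboard)):
--         if(count == (10)):
--             newboard = newboard[0:i] + "??" + newboard[i:]
--             count = 0
--         count+=1
--     return newboard
-- ===== SOURCE B (Python) =====
-- def isCapable(board, tokenindex, oppindex, token):
--     # Padded board in one pass: 11 '?' on each side, and after the first 8 payload
--     # characters every further 8-character chunk is preceded by a '??' separator.
--     p = '?' * 11 + board + '?' * 11
--     m = (len(p) - 10) // 10
--     q = p[:19] + ''.join('??' + p[19 + 8 * k: 27 + 8 * k] for k in range(m)) + p[19 + 8 * m:]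
--     i = _padded_index(oppindex)
--     place = i - _padded_index(tokenindex)
--     while True:
--         cell = q[i:i + 1]
--         if cell == '?' or cell == '.':
--             return False
--         if cell == token:
--             return True
--         i += place
--
--
-- def _padded_index(i):
--     # Each full row of 8 cells gains a 2-character separator; 11 leading cells.
--     return i + 11 + 2 * int(i / 8)
-- ===== Notes on version B (the rewrite author's own statement) =====
-- stated objective: alternative
-- what changed: B computes the padded question board in closed form in one pass (8-character chunks with '??' separators joined once) instead of A's repeated string-insertion loop that copies the whole string for every inserted '??', and simplifies the padded-index formula; the scan loop then reads the same one-character slices. A and B return identically on every input on which A returns, so there is no Pre_.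
import Mathlib
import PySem

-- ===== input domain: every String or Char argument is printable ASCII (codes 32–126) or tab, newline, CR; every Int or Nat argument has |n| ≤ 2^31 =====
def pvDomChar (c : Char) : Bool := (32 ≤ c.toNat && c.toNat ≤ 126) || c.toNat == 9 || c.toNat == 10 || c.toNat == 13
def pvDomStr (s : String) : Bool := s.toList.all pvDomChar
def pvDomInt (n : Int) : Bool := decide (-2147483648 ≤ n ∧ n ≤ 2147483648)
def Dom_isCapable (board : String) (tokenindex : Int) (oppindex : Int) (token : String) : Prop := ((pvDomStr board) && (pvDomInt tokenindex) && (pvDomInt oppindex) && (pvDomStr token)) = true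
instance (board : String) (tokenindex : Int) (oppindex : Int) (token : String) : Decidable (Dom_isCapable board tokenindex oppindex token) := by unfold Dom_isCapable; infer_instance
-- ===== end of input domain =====

-- B builds the padded question board in closed form in ONE pass (11 '?' each side, '??'
-- separator before every 8-character chunk after the first) instead of A's repeated
-- string-insertion loop, and simplifies the padded-index arithmetic (objective: alternative).

-- ===== PORT A =====

-- Body of makeQuestionBoard's for-loop: if count == 10 then
-- newboard = newboard[0:i] + "??" + newboard[i:]; count = 0; then count += 1.
-- Strings are carried as List Char; slices are PySem.List.slice (Python-exact).
def mqbStep (st : List Char × Int) (i : Int) : List Char × Int :=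
  if st.2 == 10 then
    (PySem.List.slice st.1 (some 0) (some i) ++ ['?', '?'] ++ PySem.List.slice st.1 (some i) none, (0 : Int) + 1)
  else (st.1, st.2 + 1)

-- "???????????" + board + "???????????" (11 '?' each side, written List.replicate 11 '?'),
-- then the for-loop over range(10, len(newboard)) carrying (newboard, count).
def makeQuestionBoard (board : List Char) : List Char :=
  let newboard : List Char := List.replicate 11 '?' ++ board ++ List.replicate 11 '?'
  ((PySem.List.pyRange 10 (newboard.length : Int) 1).foldl mqbStep (newboard, 1)).1

-- A's while loop; qboard[i:i+1] is PySem.List.slice, the string comparisons are List Char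
-- equality (String.toList is injective).  The fuel only makes the recursion total: any run
-- of the Python that returns does so in fewer steps than the fuel below (A diverges on the
-- remaining inputs, and there the port's value is never compared with the Python).
def isCapableLoop (qboard : List Char) (token : String) (place : Int) : Nat → Int → Bool
  | 0, _ => false
  | fuel + 1, i =>
    if PySem.List.slice qboard (some i) (some (i + 1)) ≠ ['?'] ∧
       PySem.List.slice qboard (some i) (some (i + 1)) ≠ ['.'] then
      if PySem.List.slice qboard (some i) (some (i + 1)) = token.toList then true
      else isCapableLoop qboard token place fuel (i + place)
    else false

-- int(tokenindex/8) is float-exact truncating division for |tokenindex| ≤ 2^31: PySem.Int.truncdiv.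
-- (The Python's dead local `see` is a pure read and is not kept.)
def isCapable (board : String) (tokenindex : Int) (oppindex : Int) (token : String) : Bool :=
  let qboard := makeQuestionBoard board.toList
  let qtokenindex := tokenindex + 9 + 2 * (PySem.Int.truncdiv tokenindex 8 + 1)
  let qoppindex := oppindex + 9 + 2 * (PySem.Int.truncdiv oppindex 8 + 1)
  let place := qoppindex - qtokenindex
  isCapableLoop qboard token place ((qtokenindex + place).natAbs + 2 * qboard.length + 4) (qtokenindex + place)

-- ===== PORT B =====

-- Source B's _padded_index: i + 11 + 2 * int(i / 8).
def chunkIndex (i : Int) : Int := i + 11 + 2 * PySem.Int.truncdiv i 8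

-- Source B's closed-form construction: q = p[:19] + ''.join('??' + p[19+8k:27+8k] for k in range(m)) + p[19+8m:]
def chunkBoard (board : List Char) : List Char :=
  let p : List Char := List.replicate 11 '?' ++ board ++ List.replicate 11 '?'
  let m : Nat := (p.length - 10) / 10
  PySem.List.slice p none (some 19) ++
    (List.range m).flatMap (fun (k : Nat) => ['?', '?'] ++ PySem.List.slice p (some (19 + 8 * (k : Int))) (some (27 + 8 * (k : Int)))) ++
    PySem.List.slice p (some (19 + 8 * ((p.length - 10) / 10 : Nat) : Int)) none

-- Source B's while loop: cell = q[i:i+1] (PySem.List.slice), then the two comparisons.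
-- Same fuel expression as A's port (it totalises the recursion, nothing else).
def isCapableAltLoop (q : List Char) (token : String) (place : Int) : Nat → Int → Bool
  | 0, _ => false
  | fuel + 1, i =>
    let cell := PySem.List.slice q (some i) (some (i + 1))
    if cell = ['?'] ∨ cell = ['.'] then false
    else if cell = token.toList then true
    else isCapableAltLoop q token place fuel (i + place)

def isCapable_alt (board : String) (tokenindex : Int) (oppindex : Int) (token : String) : Bool :=
  let q := chunkBoard board.toList
  let i0 := chunkIndex oppindex
  let place := i0 - chunkIndex tokenindex
  isCapableAltLoop q token place (i0.natAbs + 2 * q.length + 4) i0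

-- ===== PRECONDITION & SPEC =====

def Spec_isCapable (board : String) (tokenindex : Int) (oppindex : Int) (token : String) (out : Bool) : Prop := out = isCapable_alt board tokenindex oppindex token
instance (board : String) (tokenindex : Int) (oppindex : Int) (token : String) (out : Bool) : Decidable (Spec_isCapable board tokenindex oppindex token out) := by unfold Spec_isCapable; infer_instance

-- ===== CLAIM (what is proved, stated in full; the proofs are below) =====
def Claim_equal_isCapable : Prop := ∀ (board : String) (tokenindex : Int) (oppindex : Int) (token : String), Dom_isCapable board tokenindex oppindex token → Spec_isCapable board tokenindex oppindex token (isCapable board tokenindex oppindex token)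

-- ===== LEMMAS AND PROOFS =====

-- Inserting "??" at position pos (what one firing of makeQuestionBoard's loop body does).
def insertQQ (pos : Nat) (l : List Char) : List Char := l.take pos ++ ['?', '?'] ++ l.drop pos

-- k firings of the loop body: insertions at 19, 29, …, 19+10(k-1).
def insN (p : List Char) : Nat → List Char
  | 0 => p
  | k + 1 => insertQQ (19 + 10 * k) (insN p k)

-- The closed form the k-th state takes.
def chunksN (p : List Char) (k : Nat) : List Char :=
  p.take 19 ++ (List.range k).flatMap (fun t => ['?', '?'] ++ (p.drop (19 + 8 * t)).take 8) ++ p.drop (19 + 8 * k)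

theorem foldl_mqbStep (p : List Char) :
    ∀ j : Nat, (PySem.List.pyRange 10 (10 + (j : Int)) 1).foldl mqbStep (p, 1) =
      (insN p (j / 10), ((j % 10 : Nat) : Int) + 1) := by
  intro j
  induction j with
  | zero => simp [PySem.List.pyRange, insN]
  | succ j ih =>
    rw [show (10 + ((j + 1 : Nat) : Int)) = (10 + (j : Int)) + 1 from by push_cast; ring,
        PySem.List.pyRange_one_succ_right (by omega), List.foldl_append]
    rw [ih]
    simp only [List.foldl_cons, List.foldl_nil, mqbStep]
    by_cases hj : j % 10 = 9
    · rw [if_pos (by simp [hj])]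
      have h1 : PySem.List.slice (insN p (j / 10)) (some 0) (some (10 + (j : Int))) =
          (insN p (j / 10)).take (19 + 10 * (j / 10)) := by
        rw [PySem.List.slice_toNat _ (by omega) (by omega)]
        simp only [List.drop_zero, Int.toNat_zero, Nat.sub_zero]
        congr 1
        omega
      have h2 : PySem.List.slice (insN p (j / 10)) (some (10 + (j : Int))) none =
          (insN p (j / 10)).drop (19 + 10 * (j / 10)) := by
        rw [PySem.List.slice_from _ (by omega)]
        congr 1
        omega
      rw [h1, h2]
      have hk : (j + 1) / 10 = j / 10 + 1 := by omega
      have hm : (j + 1) % 10 = 0 := by omega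
      rw [hk, hm]
      simp [insN, insertQQ]
    · rw [if_neg (by simp; omega)]
      have hk : (j + 1) / 10 = j / 10 := by omega
      have hm : ((j + 1) % 10 : Nat) = j % 10 + 1 := by omega
      rw [hk, hm]
      simp only [Prod.mk.injEq, true_and]
      push_cast
      ring

theorem flatMap_chunk_len (p : List Char) (k : Nat) (h : 8 * k ≤ p.length - 19) (hp : 22 ≤ p.length) :
    ((List.range k).flatMap (fun t => ['?', '?'] ++ (p.drop (19 + 8 * t)).take 8)).length = 10 * k := by
  induction k with
  | zero => simp
  | succ k ih =>
    rw [List.range_succ, List.flatMap_append, List.length_append, ih (by omega)]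
    have h8 : ((p.drop (19 + 8 * k)).take 8).length = 8 := by
      rw [List.length_take, List.length_drop]
      omega
    simp only [List.flatMap_cons, List.flatMap_nil, List.append_nil, List.length_append,
      List.length_cons, List.length_nil, h8]
    omega

theorem insN_eq_chunksN (p : List Char) (hp : 22 ≤ p.length) :
    ∀ k : Nat, 8 * k ≤ p.length - 11 → insN p k = chunksN p k := by
  intro k
  induction k with
  | zero => intro _; simp [insN, chunksN, List.take_append_drop]
  | succ k ih =>
    intro hk
    have hins : insN p (k + 1) = insertQQ (19 + 10 * k) (chunksN p k) := by
      rw [show insN p (k + 1) = insertQQ (19 + 10 * k) (insN p k) from rfl, ih (by omega)]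
    rw [hins]
    unfold insertQQ chunksN
    have hXlen : (p.take 19 ++ (List.range k).flatMap (fun t => ['?', '?'] ++ (p.drop (19 + 8 * t)).take 8)).length = 19 + 10 * k := by
      rw [List.length_append, List.length_take, flatMap_chunk_len p k (by omega) hp]
      omega
    rw [List.take_left' hXlen, List.drop_left' hXlen]
    have hsplit : p.drop (19 + 8 * k) = (p.drop (19 + 8 * k)).take 8 ++ p.drop (19 + 8 * (k + 1)) := by
      rw [show 19 + 8 * (k + 1) = (19 + 8 * k) + 8 from by omega]
      rw [← List.drop_drop (i := 8) (j := 19 + 8 * k) (l := p)]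
      exact (List.take_append_drop 8 (p.drop (19 + 8 * k))).symm
    conv_lhs => rw [hsplit]
    rw [List.range_succ, List.flatMap_append]
    simp [List.append_assoc]

-- makeQuestionBoard computes Source B's closed-form board.
theorem mqb_eq_chunk (l : List Char) : makeQuestionBoard l = chunkBoard l := by
  unfold makeQuestionBoard chunkBoard
  dsimp only
  have hp : (List.replicate 11 '?' ++ l ++ List.replicate 11 '?' : List Char).length = l.length + 22 := by
    simp
  rw [show (((List.replicate 11 '?' ++ l ++ List.replicate 11 '?' : List Char).length : Nat) : Int) =
        10 + ((l.length + 12 : Nat) : Int) from by rw [hp]; push_cast; ring]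
  rw [foldl_mqbStep _ (l.length + 12)]
  rw [show ((List.replicate 11 '?' ++ l ++ List.replicate 11 '?' : List Char).length - 10) / 10 =
        (l.length + 12) / 10 from by omega]
  have h19 : PySem.List.slice (List.replicate 11 '?' ++ l ++ List.replicate 11 '?' : List Char) none (some 19) =
      (List.replicate 11 '?' ++ l ++ List.replicate 11 '?' : List Char).take 19 := by
    rw [PySem.List.slice_to _ (by norm_num)]
    rfl
  have hs : ∀ k : Nat, (['?', '?'] ++ PySem.List.slice (List.replicate 11 '?' ++ l ++ List.replicate 11 '?' : List Char)
        (some (19 + 8 * (k : Int))) (some (27 + 8 * (k : Int))) : List Char) =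
      ['?', '?'] ++ ((List.replicate 11 '?' ++ l ++ List.replicate 11 '?' : List Char).drop (19 + 8 * k)).take 8 := by
    intro k
    congr 1
    rw [PySem.List.slice_toNat _ (by omega) (by omega),
        show ((27 : Int) + 8 * (k : Int)).toNat - ((19 : Int) + 8 * (k : Int)).toNat = 8 from by omega,
        show ((19 : Int) + 8 * (k : Int)).toNat = 19 + 8 * k from by omega]
  have hlast : PySem.List.slice (List.replicate 11 '?' ++ l ++ List.replicate 11 '?' : List Char)
      (some ((19 : Int) + 8 * (((l.length + 12) / 10 : Nat) : Int))) none =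
      (List.replicate 11 '?' ++ l ++ List.replicate 11 '?' : List Char).drop (19 + 8 * ((l.length + 12) / 10)) := by
    rw [PySem.List.slice_from _ (by positivity),
        show ((19 : Int) + 8 * (((l.length + 12) / 10 : Nat) : Int)).toNat =
          19 + 8 * ((l.length + 12) / 10) from by omega]
  rw [h19]
  simp only [hs]
  rw [hlast]
  exact insN_eq_chunksN (List.replicate 11 '?' ++ l ++ List.replicate 11 '?') (by rw [hp]; omega)
    ((l.length + 12) / 10) (by rw [hp]; omega)

-- The two while loops are in lockstep: the branch tests are complementary readings of the
-- same one-character slice.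
theorem loop_eq (q : List Char) (token : String) (place : Int) :
    ∀ (fuel : Nat) (i : Int),
      isCapableLoop q token place fuel i = isCapableAltLoop q token place fuel i := by
  intro fuel
  induction fuel with
  | zero => intro i; rfl
  | succ f ih =>
    intro i
    simp only [isCapableLoop, isCapableAltLoop]
    by_cases h1 : PySem.List.slice q (some i) (some (i + 1)) = ['?']
    · simp [h1]
    · by_cases h2 : PySem.List.slice q (some i) (some (i + 1)) = ['.']
      · simp [h2]
      · by_cases h3 : PySem.List.slice q (some i) (some (i + 1)) = token.toList
        · simp [h1, h2, h3]
        · simp [h1, h2, h3, ih]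

-- ===== VERDICT (by name: the statement is the Claim_ definition above) =====
set_option maxHeartbeats 1000000 in
theorem isCapable_spec : Claim_equal_isCapable := by
  intro board ti oi token _hdom
  unfold Spec_isCapable isCapable isCapable_alt chunkIndex
  dsimp only
  rw [mqb_eq_chunk]
  rw [show (ti + 9 + 2 * (PySem.Int.truncdiv ti 8 + 1) +
        (oi + 9 + 2 * (PySem.Int.truncdiv oi 8 + 1) - (ti + 9 + 2 * (PySem.Int.truncdiv ti 8 + 1)))) =
      oi + 11 + 2 * PySem.Int.truncdiv oi 8 from by ring,
      show oi + 9 + 2 * (PySem.Int.truncdiv oi 8 + 1) - (ti + 9 + 2 * (PySem.Int.truncdiv ti 8 + 1)) =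
        oi + 11 + 2 * PySem.Int.truncdiv oi 8 - (ti + 11 + 2 * PySem.Int.truncdiv ti 8) from by ring]
  exact loop_eq _ token _ _ _
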